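-- pv_equiv track=rewrite | github.com/ddosang/AlgorithmStudy | Programmers_level1/16. 3진법 뒤집기.py | threeToDecimal
-- ===== SOURCE A (Python) =====
-- def threeToDecimal(n):
--     res = 0
--     power = 1
--     while(n != 0):
--         res += (n % 10) * power
--         power *= 3
--         n = int(n / 10)
--
--     return res
-- ===== SOURCE B (Python) =====
-- def threeToDecimal(n):
--     if n == 0:
--         return 0
--     return 3 * threeToDecimal(int(n / 10)) + n % 10
-- ===== Notes on version B (the rewrite author's own statement) =====
-- stated objective: simpler
-- what changed: B replaces A's iterative loop with two accumulators (running result and running power of three) by a direct recursive Horner evaluation (three times the recursive value of the truncated quotient, plus the last decimal digit), with no power variable and no mutable state.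
import Mathlib
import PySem

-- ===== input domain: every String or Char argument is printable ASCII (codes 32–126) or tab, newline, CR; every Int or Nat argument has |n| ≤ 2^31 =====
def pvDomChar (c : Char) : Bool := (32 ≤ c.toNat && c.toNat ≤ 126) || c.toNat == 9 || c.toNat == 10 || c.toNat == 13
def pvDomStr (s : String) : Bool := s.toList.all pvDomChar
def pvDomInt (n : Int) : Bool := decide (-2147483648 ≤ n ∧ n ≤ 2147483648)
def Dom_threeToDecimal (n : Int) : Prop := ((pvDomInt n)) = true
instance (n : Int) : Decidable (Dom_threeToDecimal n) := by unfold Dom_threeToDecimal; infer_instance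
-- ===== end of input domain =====

-- B replaces A's loop with two accumulators by a direct recursive Horner evaluation (no power accumulator); same value for all n.
-- Termination helper used by both ports' recursions.
theorem pv_tdiv10_lt (n : Int) (h : n ≠ 0) : (n.tdiv 10).natAbs < n.natAbs := by
  have : (n.tdiv 10).natAbs = n.natAbs / 10 := Int.natAbs_tdiv n 10
  have hn : 0 < n.natAbs := Int.natAbs_pos.mpr h
  omega

-- ===== PORT A =====
-- 'int(n / 10)' truncates toward zero; exact as Int.tdiv for |n| ≤ 2^31 (float division is exact enough there).
-- 'n % 10' is Python's floor mod = PySem.Int.mod.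
def threeToDecimalGo (n res power : Int) : Int :=
  if h : n = 0 then res
  else threeToDecimalGo (n.tdiv 10) (res + (PySem.Int.mod n 10) * power) (power * 3)
termination_by n.natAbs
decreasing_by exact pv_tdiv10_lt n h

def threeToDecimal (n : Int) : Int := threeToDecimalGo n 0 1

-- ===== PORT B =====
def threeToDecimal_alt (n : Int) : Int :=
  if h : n = 0 then 0
  else 3 * threeToDecimal_alt (n.tdiv 10) + PySem.Int.mod n 10
termination_by n.natAbs
decreasing_by exact pv_tdiv10_lt n h

-- ===== PRECONDITION & SPEC =====
def Spec_threeToDecimal (n : Int) (out : Int) : Prop := out = threeToDecimal_alt n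
instance (n : Int) (out : Int) : Decidable (Spec_threeToDecimal n out) := by unfold Spec_threeToDecimal; infer_instance

-- ===== CLAIM =====
def Claim_equal_threeToDecimal : Prop := ∀ (n : Int), Dom_threeToDecimal n → Spec_threeToDecimal n (threeToDecimal n)

-- ===== LEMMAS AND PROOFS =====
theorem threeToDecimalGo_eq (n res power : Int) :
    threeToDecimalGo n res power = res + power * threeToDecimal_alt n := by
  fun_induction threeToDecimalGo n res power with
  | case1 res power =>
    rw [threeToDecimal_alt]; simp
  | case2 n res power hne ih =>
    conv_rhs => rw [threeToDecimal_alt, dif_neg hne]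
    rw [ih]
    ring

-- ===== VERDICT =====
theorem threeToDecimal_spec : Claim_equal_threeToDecimal := by
  intro n _
  unfold Spec_threeToDecimal threeToDecimal
  rw [threeToDecimalGo_eq]; ring
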